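-- pv_equiv track=rewrite | github.com/Andreaceci91/Esame14092022 | esame.py | compute_daily_max_difference
-- ===== SOURCE A (Python) =====
-- def compute_daily_max_difference(time_series):
--
--     # Declare variables
--     values = []
--     length = len(time_series)
--
--     # Check if legth of list have only 1 element
--     if length == 1:
--         values.append(None)
--
--     else:
--         prev = 0
--         after = 0
--
--         i = 0
--         #j = 0
--
--         while i < length:
--
--             # Use a variable to check if there are a single measure
--             single = False
--
--             temp = 0
--
--             # Calculate the value before if the index is different by 0
--             if i != 0:
--                 prev = (time_series[i-1][0] - (time_series[i-1][0] % 86400))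
--
--             # Calculate current value
--             curr = (time_series[i][0] - (time_series[i][0] % 86400))
--
--             # Calculate next value
--             if i != length-1:
--                 after = (time_series[i+1][0] - (time_series[i+1][0] % 86400))
--
--             # Check "Single" at the beginning of list
--             if curr != after and i == 0:
--                 temp = None
--                 single = True
--
--             if prev != curr and curr != after and i != 0:
--                 temp = None
--                 single = True
--
--             # Check "Single" at the end of list
--             if prev != curr and i == length-1:
--                 temp = None
--                 single = True
--
--             # If i have not found "Single" element in list
--             if single == False:
--                 j = i
--
--                 # Empty list I add Temp of same day
--                 list_calc = []
--
--                 while (j < length and ((time_series[j][0] - (time_series[j][0] % 86400)) == curr)):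
--
--                     # Add at temporany list al values of the same day
--                     list_calc.append(time_series[j][1])
--                     j+=1
--
--                 # Calculate maximum daily excursion subtract at the "max value of temp" the "min value of temp"
--                 temp = max(list_calc) - min(list_calc)
--
--                 i = j-1
--
--             i += 1
--
--             # Attach temp at the list
--             values.append(temp)
--
--     # Return list of values
--     return(values)
-- ===== SOURCE B (Python) =====
-- def compute_daily_max_difference(time_series):
--     # Single pass keeping only (day, min, max, count) of the current run of
--     # consecutive same-day measurements; flush a run when the day changes.
--     values = []
--     cur = None  # (day, mn, mx, count)
--     for ts, v in time_series:
--         day = ts // 86400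
--         if cur is None:
--             cur = (day, v, v, 1)
--         elif day == cur[0]:
--             _, mn, mx, c = cur
--             cur = (day, min(mn, v), max(mx, v), c + 1)
--         else:
--             _, mn, mx, c = cur
--             values.append(None if c == 1 else mx - mn)
--             cur = (day, v, v, 1)
--     if cur is not None:
--         _, mn, mx, c = cur
--         values.append(None if c == 1 else mx - mn)
--     return values
-- ===== Notes on version B (the rewrite author's own statement) =====
-- stated objective: simpler
-- what changed: Replaces A's index-driven while loop with lookbehind/lookahead neighbour comparisons, a three-way 'single' flag and a nested same-day rescan by one linear fold that keeps only (day, min, max, count) of the current run and flushes it when the day bucket changes.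
import Mathlib
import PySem

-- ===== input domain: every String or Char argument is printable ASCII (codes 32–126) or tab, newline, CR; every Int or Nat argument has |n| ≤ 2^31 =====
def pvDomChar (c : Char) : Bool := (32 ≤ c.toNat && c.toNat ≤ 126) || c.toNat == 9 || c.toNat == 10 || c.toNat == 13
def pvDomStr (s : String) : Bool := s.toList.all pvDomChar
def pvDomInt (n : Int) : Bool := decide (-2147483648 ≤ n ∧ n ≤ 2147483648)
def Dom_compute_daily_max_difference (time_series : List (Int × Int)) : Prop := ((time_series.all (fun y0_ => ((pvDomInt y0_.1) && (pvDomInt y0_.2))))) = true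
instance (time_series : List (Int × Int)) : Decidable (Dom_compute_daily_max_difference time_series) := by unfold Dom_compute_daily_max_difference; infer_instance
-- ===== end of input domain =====

-- B replaces A's index-driven neighbour-comparing while loop (with nested same-day rescan)
-- by a single fold keeping (day, min, max, count) of the current run; same return values, no side effects.


-- ===== PORT A =====
-- day bucket as A computes it: t - t % 86400 (Python floor mod = PySem.Int.mod)
def pvDayA (t : Int) : Int := t - PySem.Int.mod t 86400

-- A's inner while loop: collect values of the same day starting at index j
-- (fuel = remaining indices, a pure totality guard: the loop body is A's, step for step)
def pvAInner (ts : List (Int × Int)) (curr : Int) : Nat → Nat → List Int → Nat × List Int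
  | 0, j, acc => (j, acc)
  | fuel + 1, j, acc =>
    if h : j < ts.length then
      if pvDayA ts[j].1 = curr then
        pvAInner ts curr fuel (j + 1) (acc ++ [ts[j].2])
      else (j, acc)
    else (j, acc)

-- the three sequential "single" checks of A's loop body, in A's order; state = (temp, single)
def pvASingle (prev1 curr after1 : Int) (i len : Nat) : Option Int × Bool :=
  let s1 : Option Int × Bool := if curr ≠ after1 ∧ i = 0 then (none, true) else (some 0, false)
  let s2 : Option Int × Bool := if prev1 ≠ curr ∧ curr ≠ after1 ∧ i ≠ 0 then (none, true) else s1
  if prev1 ≠ curr ∧ i = len - 1 then (none, true) else s2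

-- A's outer while loop; prev/after persist across iterations as in the Python
-- (fuel again only makes the iteration total; i advances exactly as in A)
def pvAOuter (ts : List (Int × Int)) : Nat → Int → Int → Nat → List (Option Int) → List (Option Int)
  | 0, _, _, _, values => values
  | fuel + 1, prev, after, i, values =>
    if h : i < ts.length then
      let prev1 := if i ≠ 0 then pvDayA (ts.getD (i - 1) (0, 0)).1 else prev
      let curr := pvDayA ts[i].1
      let after1 := if i ≠ ts.length - 1 then pvDayA (ts.getD (i + 1) (0, 0)).1 else after
      let s3 := pvASingle prev1 curr after1 i ts.length
      if s3.2 = false then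
        let p := pvAInner ts curr (ts.length - i) i []
        -- list_calc = p.2 is nonempty here (ts[i] itself qualifies), so the .getD 0 defaults are unreachable
        let temp : Option Int :=
          some ((PySem.List.max? p.2 (fun y => y)).getD 0 - (PySem.List.min? p.2 (fun y => y)).getD 0)
        pvAOuter ts fuel prev1 after1 p.1 (values ++ [temp])
      else
        pvAOuter ts fuel prev1 after1 (i + 1) (values ++ [s3.1])
    else values

def compute_daily_max_difference (time_series : List (Int × Int)) : List (Option Int) :=
  if time_series.length = 1 then [none]
  else pvAOuter time_series time_series.length 0 0 0 []

-- ===== PORT B =====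
def pvBFlush (mn mx c : Int) : Option Int := if c = 1 then none else some (mx - mn)

-- B's single pass: cur = (day, min, max, count) of the current run of consecutive same-day rows
def pvBLoop (ts : List (Int × Int)) (cur : Option (Int × Int × Int × Int)) (values : List (Option Int)) : List (Option Int) :=
  match ts with
  | [] =>
    match cur with
    | none => values
    | some (_, mn, mx, c) => values ++ [pvBFlush mn mx c]
  | (t, v) :: rest =>
    let day := PySem.Int.floordiv t 86400
    match cur with
    | none => pvBLoop rest (some (day, v, v, 1)) values
    | some (d0, mn, mx, c) =>
      if day = d0 then pvBLoop rest (some (day, min mn v, max mx v, c + 1)) values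
      else pvBLoop rest (some (day, v, v, 1)) (values ++ [pvBFlush mn mx c])

def compute_daily_max_difference_alt (time_series : List (Int × Int)) : List (Option Int) :=
  pvBLoop time_series none []

-- ===== PRECONDITION & SPEC =====
def Spec_compute_daily_max_difference (time_series : List (Int × Int)) (out : List (Option Int)) : Prop := out = compute_daily_max_difference_alt time_series
instance (time_series : List (Int × Int)) (out : List (Option Int)) : Decidable (Spec_compute_daily_max_difference time_series out) := by unfold Spec_compute_daily_max_difference; infer_instance

-- ===== CLAIM (what is proved, stated in full; the proofs are below) =====
def Claim_equal_compute_daily_max_difference : Prop := ∀ (time_series : List (Int × Int)), Dom_compute_daily_max_difference time_series → Spec_compute_daily_max_difference time_series (compute_daily_max_difference time_series)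

-- ===== LEMMAS AND PROOFS =====

-- canonical day bucket and the common specification both ports are reduced to
def pvDay (t : Int) : Int := PySem.Int.floordiv t 86400

def pvP (c : Int) : Int × Int → Bool := fun y => decide (pvDay y.1 = c)

def pvFlush (v : Int) (t : List Int) : Option Int :=
  if t.isEmpty then none else some (t.foldl max v - t.foldl min v)

def pvSpec : List (Int × Int) → List (Option Int)
  | [] => []
  | x :: xs =>
      pvFlush x.2 ((xs.takeWhile (pvP (pvDay x.1))).map Prod.snd)
        :: pvSpec (xs.dropWhile (pvP (pvDay x.1)))
termination_by l => l.length
decreasing_by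
  have := List.length_dropWhile_le (pvP (pvDay x.1)) xs
  simp at this ⊢
  omega

theorem pvDayA_mul (t : Int) : pvDayA t = pvDay t * 86400 := by
  have := PySem.Int.floordiv_mul_add_mod t 86400
  simp only [pvDayA, pvDay]
  omega

theorem pvDayA_eq_iff (a b : Int) : pvDayA a = pvDayA b ↔ pvDay a = pvDay b := by
  rw [pvDayA_mul, pvDayA_mul]
  constructor <;> intro h <;> omega

theorem pvPA_eq (x : Int) : (fun y : Int × Int => decide (pvDayA y.1 = pvDayA x)) = pvP (pvDay x) := by
  funext y
  simp [pvP, pvDayA_eq_iff]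

-- generic list facts used by the A-side proof
theorem pvDropWhile_eq {a : Type} (p : a → Bool) (l : List a) :
    l.dropWhile p = l.drop (l.takeWhile p).length := by
  induction l with
  | nil => simp
  | cons x t ih => by_cases hp : p x <;> simp [hp, ih]

theorem pvTakeWhile_boundary {a : Type} (p : a → Bool) (l : List a)
    (h : (l.takeWhile p).length < l.length) : p (l[(l.takeWhile p).length]'h) = false := by
  induction l with
  | nil => simp at h
  | cons x t ih =>
    by_cases hp : p x
    · have h' : (t.takeWhile p).length < t.length := by
        simp [List.takeWhile_cons_of_pos hp] at h
        omega
      have := ih h'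
      simp only [List.takeWhile_cons_of_pos hp, List.length_cons, List.getElem_cons_succ]
      exact this
    · simp only [List.takeWhile_cons_of_neg hp, List.length_nil, List.getElem_cons_zero]
      simpa using hp

theorem pvTakeWhile_inside {a : Type} (p : a → Bool) (l : List a) (m : Nat)
    (hm : m < (l.takeWhile p).length) (hl : m < l.length) : p (l[m]'hl) = true := by
  have hpre : l.takeWhile p <+: l := List.takeWhile_prefix p
  have := List.mem_takeWhile_imp (List.getElem_mem hm)
  rwa [List.IsPrefix.getElem hpre hm] at this

-- ===== B-side =====
theorem pvBFlush_run (v0 : Int) (vs : List Int) :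
    pvBFlush (vs.foldl min v0) (vs.foldl max v0) ((vs.length : Int) + 1) = pvFlush v0 vs := by
  cases vs with
  | nil => simp [pvBFlush, pvFlush]
  | cons x t =>
    simp [pvBFlush, pvFlush]
    omega

theorem pvBLoop_run (xs : List (Int × Int)) : ∀ (d v0 : Int) (vs : List Int) (values : List (Option Int)),
    pvBLoop xs (some (d, vs.foldl min v0, vs.foldl max v0, (vs.length : Int) + 1)) values
      = values ++ pvFlush v0 (vs ++ (xs.takeWhile (pvP d)).map Prod.snd)
          :: pvSpec (xs.dropWhile (pvP d)) := by
  induction xs with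
  | nil =>
    intro d v0 vs values
    simp [pvBLoop, pvSpec, pvBFlush_run]
  | cons x rest ih =>
    obtain ⟨t, v⟩ := x
    intro d v0 vs values
    have hday : PySem.Int.floordiv t 86400 = pvDay t := rfl
    by_cases hd : pvDay t = d
    · have hp : pvP d (t, v) = true := by simp [pvP, hd]
      have e1 : min (vs.foldl min v0) v = (vs ++ [v]).foldl min v0 := by simp [List.foldl_append]
      have e2 : max (vs.foldl max v0) v = (vs ++ [v]).foldl max v0 := by simp [List.foldl_append]
      have e3 : (vs.length : Int) + 1 + 1 = (((vs ++ [v]).length : Int) + 1) := by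
        simp
      simp only [pvBLoop, hday, hd]
      rw [e1, e2, e3, ih]
      simp [List.takeWhile_cons_of_pos hp, List.dropWhile_cons_of_pos hp]
    · have hp : pvP d (t, v) = false := by simp [pvP, hd]
      simp only [pvBLoop, hday]
      rw [if_neg hd]
      have h0 : pvBLoop rest (some (pvDay t, v, v, 1)) (values ++ [pvBFlush (vs.foldl min v0) (vs.foldl max v0) ((vs.length : Int) + 1)])
          = (values ++ [pvBFlush (vs.foldl min v0) (vs.foldl max v0) ((vs.length : Int) + 1)])
              ++ pvFlush v (([] : List Int) ++ (rest.takeWhile (pvP (pvDay t))).map Prod.snd)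
              :: pvSpec (rest.dropWhile (pvP (pvDay t))) := by
        have := ih (pvDay t) v [] (values ++ [pvBFlush (vs.foldl min v0) (vs.foldl max v0) ((vs.length : Int) + 1)])
        simpa using this
      rw [h0, pvBFlush_run]
      rw [List.takeWhile_cons_of_neg (by simp [hp]), List.dropWhile_cons_of_neg (by simp [hp])]
      rw [pvSpec]
      simp

theorem compute_daily_max_difference_alt_eq (ts : List (Int × Int)) :
    compute_daily_max_difference_alt ts = pvSpec ts := by
  cases ts with
  | nil => simp [compute_daily_max_difference_alt, pvBLoop, pvSpec]
  | cons x rest =>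
    obtain ⟨t, v⟩ := x
    have h0 : compute_daily_max_difference_alt ((t, v) :: rest)
        = pvBLoop rest (some (pvDay t, v, v, 1)) [] := rfl
    have h1 := pvBLoop_run rest (pvDay t) v [] []
    simp only [List.foldl_nil, List.length_nil, Nat.cast_zero, zero_add, List.nil_append] at h1
    rw [h0, h1, pvSpec]

-- ===== A-side =====
theorem pvGetElem_idx {a : Type} (l : List a) (m k : Nat) (h : m = k) {hm : m < l.length} :
    l[m]'hm = l[k]'(h ▸ hm) := by subst h; rfl

theorem pvASingle_last (prev1 curr after1 : Int) (i len : Nat)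
    (h1 : prev1 ≠ curr) (h2 : i = len - 1) :
    pvASingle prev1 curr after1 i len = (none, true) := by
  simp [pvASingle, h1, h2]

theorem pvASingle_first_eq (prev1 curr after1 : Int) (i len : Nat)
    (h0 : i = 0) (he : curr = after1) (hl : i ≠ len - 1) :
    pvASingle prev1 curr after1 i len = (some 0, false) := by
  subst h0
  simp [pvASingle, he]
  omega

theorem pvASingle_first_ne (prev1 curr after1 : Int) (i len : Nat)
    (h0 : i = 0) (hne : curr ≠ after1) :
    pvASingle prev1 curr after1 i len = (none, true) := by
  by_cases h3 : prev1 ≠ curr ∧ i = len - 1 <;> simp [pvASingle, h3, h0, hne]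

theorem pvASingle_mid_eq (prev1 curr after1 : Int) (i len : Nat)
    (_hp : prev1 ≠ curr) (he : curr = after1) (hl : i ≠ len - 1) :
    pvASingle prev1 curr after1 i len = (some 0, false) := by
  simp [pvASingle, he, hl]

theorem pvASingle_mid_ne (prev1 curr after1 : Int) (i len : Nat)
    (hp : prev1 ≠ curr) (hne : curr ≠ after1) (h0 : i ≠ 0) :
    pvASingle prev1 curr after1 i len = (none, true) := by
  by_cases h3 : i = len - 1 <;> simp [pvASingle, hp, hne, h0, h3]

theorem pvAInner_spec (ts : List (Int × Int)) (curr : Int) : ∀ (fuel j : Nat) (acc : List Int),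
    ts.length - j ≤ fuel →
    pvAInner ts curr fuel j acc =
      (j + ((ts.drop j).takeWhile (fun y => decide (pvDayA y.1 = curr))).length,
       acc ++ ((ts.drop j).takeWhile (fun y => decide (pvDayA y.1 = curr))).map Prod.snd) := by
  intro fuel
  induction fuel with
  | zero =>
    intro j acc hf
    rw [pvAInner, List.drop_eq_nil_of_le (by omega)]
    simp
  | succ fuel ih =>
    intro j acc hf
    rw [pvAInner]
    by_cases h : j < ts.length
    · rw [dif_pos h]
      by_cases hd : pvDayA ts[j].1 = curr
      · rw [if_pos hd, ih (j + 1) _ (by omega)]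
        rw [List.drop_eq_getElem_cons h, List.takeWhile_cons_of_pos (by simpa using hd)]
        simp
        omega
      · rw [if_neg hd]
        rw [List.drop_eq_getElem_cons h, List.takeWhile_cons_of_neg (by simpa using hd)]
        simp
    · rw [dif_neg h, List.drop_eq_nil_of_le (by omega)]
      simp

theorem pvFuelStep (len i k fuel : Nat) (h1 : len - i ≤ fuel + 1) (h : i < len) :
    len - (i + (k + 1)) ≤ fuel := by omega

theorem pvAOuter_run (ts : List (Int × Int)) : ∀ (fuel i : Nat) (prev after : Int) (values : List (Option Int)),
    ts.length - i ≤ fuel → ts.length ≠ 1 → i ≤ ts.length →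
    (i = ts.length ∨ i = 0 ∨ ∃ h : i < ts.length, pvDayA (ts[i-1]'(by omega)).1 ≠ pvDayA (ts[i]'h).1) →
    pvAOuter ts fuel prev after i values = values ++ pvSpec (ts.drop i) := by
  intro fuel
  induction fuel with
  | zero =>
    intro i prev after values hn hlen1 hile hgs
    have hieq : i = ts.length := by omega
    subst hieq
    rw [pvAOuter, List.drop_eq_nil_of_le (le_refl _)]
    simp [pvSpec]
  | succ fuel IH =>
  intro i prev after values hn hlen1 hile hgs
  by_cases h : i < ts.length
  · have hx : ts.drop i = ts[i] :: ts.drop (i + 1) := List.drop_eq_getElem_cons h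
    by_cases hnext : i + 1 < ts.length
    · -- there is a next element
      have hx2 : ts.drop (i + 1) = ts[i + 1] :: ts.drop (i + 2) := List.drop_eq_getElem_cons hnext
      have hgd1 : ts.getD (i + 1) (0, 0) = ts[i + 1]'hnext :=
        List.getD_eq_getElem ts (0, 0) hnext
      have hil : i ≠ ts.length - 1 := by omega
      have hafter : (if i ≠ ts.length - 1 then pvDayA (ts.getD (i + 1) (0, 0)).1 else after)
          = pvDayA (ts[i + 1]'hnext).1 := by rw [if_pos hil, hgd1]
      by_cases hd : pvDayA (ts[i + 1]'hnext).1 = pvDayA (ts[i]'h).1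
      · -- run of length ≥ 2: no "single" check fires, the inner loop consumes the run
        have hs3 : pvASingle (if i ≠ 0 then pvDayA (ts.getD (i - 1) (0, 0)).1 else prev)
            (pvDayA (ts[i]'h).1)
            (if i ≠ ts.length - 1 then pvDayA (ts.getD (i + 1) (0, 0)).1 else after)
            i ts.length = (some 0, false) := by
          rw [hafter]
          rcases hgs with h1 | h2 | ⟨hh, hprevne⟩
          · omega
          · rw [if_neg (by omega)]
            exact pvASingle_first_eq _ _ _ _ _ h2 hd.symm hil
          · have h0 : i ≠ 0 := fun e => hprevne (by subst e; rfl)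
            rw [if_pos h0,
              List.getD_eq_getElem ts (0, 0) (by omega)]
            exact pvASingle_mid_eq _ _ _ _ _ hprevne hd.symm hil
        rw [pvAOuter, dif_pos h]
        simp only [hs3]
        simp only [if_true]
        have hinner := pvAInner_spec ts (pvDayA (ts[i]'h).1) (ts.length - i) i [] (le_refl _)
        rw [hx, List.takeWhile_cons_of_pos (by simp)] at hinner
        set pA : Int × Int → Bool := fun y => decide (pvDayA y.1 = pvDayA (ts[i]'h).1) with hpA
        set gt : List (Int × Int) := (ts.drop (i + 1)).takeWhile pA with hgt
        have hgtne : gt ≠ [] := by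
          rw [hgt, hx2, List.takeWhile_cons_of_pos (by simpa [hpA] using hd)]
          simp
        have hk1 : 1 ≤ gt.length := by
          cases gtc : gt with
          | nil => exact absurd gtc hgtne
          | cons a b => simp
        have hkle : gt.length ≤ ts.length - (i + 1) := by
          have := (List.takeWhile_prefix (l := ts.drop (i + 1)) pA).length_le
          simpa [hgt] using this
        rw [hinner]
        simp only [List.length_cons, List.map_cons, List.nil_append,
          PySem.List.max?_id_cons, PySem.List.min?_id_cons, Option.getD_some]
        -- recursive call at j = i + (gt.length + 1), a group boundary
        have hgsj : i + (gt.length + 1) = ts.length ∨ i + (gt.length + 1) = 0 ∨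
            ∃ hj : i + (gt.length + 1) < ts.length,
              pvDayA (ts[i + (gt.length + 1) - 1]'(by omega)).1
                ≠ pvDayA (ts[i + (gt.length + 1)]'hj).1 := by
          by_cases hjl : i + (gt.length + 1) < ts.length
          · right; right
            refine ⟨hjl, ?_⟩
            have hlen_drop : (ts.drop (i + 1)).length = ts.length - (i + 1) :=
              List.length_drop ..
            have hin : pA ((ts.drop (i + 1))[gt.length - 1]'(by rw [hlen_drop]; omega)) = true := by
              refine pvTakeWhile_inside pA (ts.drop (i + 1)) (gt.length - 1) ?_ _
              rw [← hgt]; omega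
            have hout : pA ((ts.drop (i + 1))[gt.length]'(by rw [hlen_drop]; omega)) = false := by
              have := pvTakeWhile_boundary pA (ts.drop (i + 1))
                (by rw [← hgt, hlen_drop]; omega)
              simpa [← hgt] using this
            rw [List.getElem_drop] at hin hout
            have e1 : i + (gt.length + 1) - 1 = i + 1 + (gt.length - 1) := by omega
            have e2 : i + (gt.length + 1) = i + 1 + gt.length := by omega
            rw [pvGetElem_idx ts _ _ e1, pvGetElem_idx ts _ _ e2]
            simp only [hpA, decide_eq_true_eq, decide_eq_false_iff_not] at hin hout
            rw [hin]
            exact fun e => hout e.symm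
          · left; omega
        have hm2 : ts.length - (i + (gt.length + 1)) ≤ fuel := pvFuelStep _ _ _ _ hn h
        have hle2 : i + (gt.length + 1) ≤ ts.length := by omega
        rw [IH (i + (gt.length + 1)) _ _ _ hm2 hlen1 hle2 hgsj]
        -- right-hand side: unfold one pvSpec group
        have hdw : (ts.drop (i + 1)).dropWhile pA = ts.drop (i + (gt.length + 1)) := by
          rw [pvDropWhile_eq, ← hgt, List.drop_drop]
          congr 1
          omega
        have hflush : pvFlush (ts[i]'h).2 (gt.map Prod.snd)
            = some ((gt.map Prod.snd).foldl max (ts[i]'h).2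
                - (gt.map Prod.snd).foldl min (ts[i]'h).2) := by
          rw [pvFlush, if_neg]
          simp [hgtne]
        rw [hx, pvSpec]
        rw [show pvP (pvDay (ts[i]'h).1) = pA by rw [hpA, pvPA_eq]]
        rw [← hgt, hdw, hflush]
        simp
      · -- next element is on another day: singleton run, "single" fires
        have hs3 : pvASingle (if i ≠ 0 then pvDayA (ts.getD (i - 1) (0, 0)).1 else prev)
            (pvDayA (ts[i]'h).1)
            (if i ≠ ts.length - 1 then pvDayA (ts.getD (i + 1) (0, 0)).1 else after)
            i ts.length = (none, true) := by
          rw [hafter]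
          rcases hgs with h1 | h2 | ⟨hh, hprevne⟩
          · omega
          · rw [if_neg (by omega)]
            exact pvASingle_first_ne _ _ _ _ _ h2 (fun e => hd e.symm)
          · have h0 : i ≠ 0 := fun e => hprevne (by subst e; rfl)
            rw [if_pos h0,
              List.getD_eq_getElem ts (0, 0) (by omega)]
            exact pvASingle_mid_ne _ _ _ _ _ hprevne (fun e => hd e.symm) h0
        rw [pvAOuter, dif_pos h]
        simp only [hs3]
        rw [if_neg (by simp)]
        have hm1 : ts.length - (i + 1) ≤ fuel := pvFuelStep ts.length i 0 fuel hn h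
        have hle1 : i + 1 ≤ ts.length := by omega
        rw [IH (i + 1) _ _ _ hm1 hlen1 hle1
          (Or.inr (Or.inr ⟨hnext, fun e => hd e.symm⟩))]
        rw [hx, pvSpec]
        rw [show pvP (pvDay (ts[i]'h).1)
            = (fun y : Int × Int => decide (pvDayA y.1 = pvDayA (ts[i]'h).1)) by rw [pvPA_eq]]
        rw [hx2, List.takeWhile_cons_of_neg (by simpa using hd),
          List.dropWhile_cons_of_neg (by simpa using hd), ← hx2]
        simp [pvFlush]
    · -- i is the last index: a singleton run at the end of the list
      have hi0 : i ≠ 0 := by omega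
      obtain ⟨hh, hprevne⟩ : ∃ hh : i < ts.length,
          pvDayA (ts[i - 1]'(by omega)).1 ≠ pvDayA (ts[i]'hh).1 := by
        rcases hgs with h1 | h2 | h3
        · omega
        · omega
        · exact h3
      have hs3 : pvASingle (if i ≠ 0 then pvDayA (ts.getD (i - 1) (0, 0)).1 else prev)
          (pvDayA (ts[i]'h).1)
          (if i ≠ ts.length - 1 then pvDayA (ts.getD (i + 1) (0, 0)).1 else after)
          i ts.length = (none, true) := by
        rw [if_pos hi0, List.getD_eq_getElem ts (0, 0) (show i - 1 < ts.length by omega)]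
        exact pvASingle_last _ _ _ _ _ hprevne (by omega)
      rw [pvAOuter, dif_pos h]
      simp only [hs3]
      rw [if_neg (by simp)]
      have hm1 : ts.length - (i + 1) ≤ fuel := pvFuelStep ts.length i 0 fuel hn h
      have hle1 : i + 1 ≤ ts.length := by omega
      have hj1 : i + 1 = ts.length := by omega
      rw [IH (i + 1) _ _ _ hm1 hlen1 hle1 (Or.inl hj1)]
      rw [hx, List.drop_eq_nil_of_le (show ts.length ≤ i + 1 by omega), pvSpec]
      simp [pvSpec, pvFlush]
  · have hieq : i = ts.length := by omega
    subst hieq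
    rw [pvAOuter, dif_neg (by omega), List.drop_eq_nil_of_le (le_refl _)]
    simp [pvSpec]

theorem compute_daily_max_difference_eq (ts : List (Int × Int)) :
    compute_daily_max_difference ts = pvSpec ts := by
  by_cases hl : ts.length = 1
  · obtain ⟨x, hx⟩ := List.length_eq_one_iff.mp hl
    subst hx
    simp [compute_daily_max_difference, pvSpec, pvFlush]
  · rw [compute_daily_max_difference]
    rw [if_neg hl]
    have := pvAOuter_run ts ts.length 0 0 0 [] (by omega) hl (by omega) (Or.inr (Or.inl rfl))
    simpa using this

-- ===== VERDICT (by name: the statement is the Claim_ definition above) =====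
theorem compute_daily_max_difference_spec : Claim_equal_compute_daily_max_difference := by
  intro ts _
  unfold Spec_compute_daily_max_difference
  rw [compute_daily_max_difference_eq, compute_daily_max_difference_alt_eq]
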